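-- pv_equiv track=rewrite | github.com/naha7777/A_Maze_Ing | draw_path.py | calcul_path_coordinates
-- ===== SOURCE A (Python) =====
-- def calcul_path_coordinates(input: tuple, path: str) -> list:
--     path_coordinates = []
--
--     for c in path:
--         if c not in "NSEW":
--             continue
--         x1, y1 = input
--
--         if c == "S":
--             input = (x1, y1+1)
--         elif c == "E":
--             input = (x1+1, y1)
--         elif c == "N":
--             input = (x1, y1-1)
--         elif c == "W":
--             input = (x1-1, y1)
--
--         path_coordinates.append(input)
--     return path_coordinates
-- ===== SOURCE B (Python) =====
-- _DELTAS = {"N": (0, -1), "S": (0, 1), "E": (1, 0), "W": (-1, 0)}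
--
-- def calcul_path_coordinates(input: tuple, path: str) -> list:
--     # phase 1: translate the path into movement vectors
--     deltas = [_DELTAS[c] for c in path if c in _DELTAS]
--     # phase 2: prefix-sum the vectors from the start point (start excluded)
--     return _accumulate(tuple(input), deltas)
--
-- def _accumulate(p, deltas):
--     if not deltas:
--         return []
--     (dx, dy) = deltas[0]
--     q = (p[0] + dx, p[1] + dy)
--     return [q] + _accumulate(q, deltas[1:])
-- ===== Notes on version B (the rewrite author's own statement) =====
-- stated objective: simpler
-- what changed: Replaces the interleaved if/elif branch-and-append loop over the shared tuple state with a two-phase decomposition: map each NSEW character to a (dx,dy) vector via a delta table, then prefix-sum the vectors recursively from the start point.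
import Mathlib
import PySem

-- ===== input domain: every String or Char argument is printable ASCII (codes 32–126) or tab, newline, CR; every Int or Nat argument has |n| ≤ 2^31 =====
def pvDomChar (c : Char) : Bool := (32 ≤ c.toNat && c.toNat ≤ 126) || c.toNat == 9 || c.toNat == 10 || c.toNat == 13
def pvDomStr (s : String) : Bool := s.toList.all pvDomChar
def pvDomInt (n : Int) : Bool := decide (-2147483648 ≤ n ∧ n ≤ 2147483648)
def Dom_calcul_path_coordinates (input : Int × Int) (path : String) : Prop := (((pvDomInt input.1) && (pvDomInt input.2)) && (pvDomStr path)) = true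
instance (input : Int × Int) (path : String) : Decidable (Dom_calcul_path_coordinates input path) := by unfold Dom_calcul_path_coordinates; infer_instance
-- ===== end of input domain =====

-- ===== PORT A =====
-- B changes: two-phase decomposition (delta table + recursive prefix sum) instead of A's interleaved branch-and-append loop; objective: simpler.
def pvStepA (st : (Int × Int) × List (Int × Int)) (c : Char) : (Int × Int) × List (Int × Int) :=
  if c ∉ ['N', 'S', 'E', 'W'] then st
  else
    let x1 := st.1.1
    let y1 := st.1.2
    let input' :=
      if c = 'S' then (x1, y1 + 1)
      else if c = 'E' then (x1 + 1, y1)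
      else if c = 'N' then (x1, y1 - 1)
      else if c = 'W' then (x1 - 1, y1)
      else st.1
    (input', st.2 ++ [input'])

def calcul_path_coordinates (input : Int × Int) (path : String) : List (Int × Int) :=
  (path.toList.foldl pvStepA (input, [])).2

-- ===== PORT B =====
def pvDelta? (c : Char) : Option (Int × Int) :=
  if c = 'N' then some (0, -1)
  else if c = 'S' then some (0, 1)
  else if c = 'E' then some (1, 0)
  else if c = 'W' then some (-1, 0)
  else none

def pvAccum (p : Int × Int) : List (Int × Int) → List (Int × Int)
  | [] => []
  | d :: ds =>
    let q := (p.1 + d.1, p.2 + d.2)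
    q :: pvAccum q ds

def calcul_path_coordinates_alt (input : Int × Int) (path : String) : List (Int × Int) :=
  pvAccum input (path.toList.filterMap pvDelta?)

-- ===== PRECONDITION & SPEC =====
def Spec_calcul_path_coordinates (input : Int × Int) (path : String) (out : List (Int × Int)) : Prop := out = calcul_path_coordinates_alt input path
instance (input : Int × Int) (path : String) (out : List (Int × Int)) : Decidable (Spec_calcul_path_coordinates input path out) := by unfold Spec_calcul_path_coordinates; infer_instance

-- ===== CLAIM (what is proved, stated in full; the proofs are below) =====
def Claim_equal_calcul_path_coordinates : Prop := ∀ (input : Int × Int) (path : String), Dom_calcul_path_coordinates input path → Spec_calcul_path_coordinates input path (calcul_path_coordinates input path)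

-- ===== LEMMAS AND PROOFS =====
lemma pv_fold_accum (cs : List Char) (input : Int × Int) (acc : List (Int × Int)) :
    (cs.foldl pvStepA (input, acc)).2 = acc ++ pvAccum input (cs.filterMap pvDelta?) := by
  induction cs generalizing input acc with
  | nil => simp [pvAccum]
  | cons c cs ih =>
    by_cases hN : c = 'N'
    · subst hN; simp [pvStepA, pvDelta?, pvAccum, ih, sub_eq_add_neg]
    · by_cases hS : c = 'S'
      · subst hS; simp [pvStepA, pvDelta?, pvAccum, ih]
      · by_cases hE : c = 'E'
        · subst hE; simp [pvStepA, pvDelta?, pvAccum, ih]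
        · by_cases hW : c = 'W'
          · subst hW; simp [pvStepA, pvDelta?, pvAccum, ih, sub_eq_add_neg]
          · simp [pvStepA, pvDelta?, hN, hS, hE, hW, ih]

-- ===== VERDICT (by name: the statement is the Claim_ definition above) =====
theorem calcul_path_coordinates_spec : Claim_equal_calcul_path_coordinates := by
  intro input path _
  unfold Spec_calcul_path_coordinates calcul_path_coordinates calcul_path_coordinates_alt
  simpa using pv_fold_accum path.toList input []
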